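-- pv_equiv track=rewrite | github.com/MichelleZ/leetcode | algorithms/python/countUnhappyFriends/countUnhappyFriends.py | unhappyFriends
-- ===== SOURCE A (Python) =====
-- from typing import List
--
-- def unhappyFriends(n: int, preferences: List[List[int]], pairs: List[List[int]]) -> int:
--     pair = [0 for _ in range(n)]
--     for p1, p2 in pairs:
--         pair[p1] = p2
--         pair[p2] = p1
--     prefer = [[0 for _ in range(n)] for _ in range(n)]
--     for x in range(n):
--         for i in range(len(preferences[x])):
--             prefer[x][preferences[x][i]] = i
--     res = 0
--     for x in range(n):
--         y = pair[x]
--         found = False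
--         u = 0
--         while u < n and not found:
--             if u != x and u != y:
--                 v = pair[u]
--                 found |= (prefer[x][u] < prefer[x][y] and prefer[u][x] < prefer[u][v])
--             u += 1
--         if found:
--             res += 1
--     return res
-- ===== SOURCE B (Python) =====
-- from typing import List
--
-- def unhappyFriends(n: int, preferences: List[List[int]], pairs: List[List[int]]) -> int:
--     pair = [0] * n
--     for p1, p2 in pairs:
--         pair[p1] = p2
--         pair[p2] = p1
--     rank = [{f: i for i, f in enumerate(p)} for p in preferences]
--     res = 0
--     for x in range(n):
--         y = pair[x]
--         for u in preferences[x]: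
--             if u == y:
--                 break
--             if rank[u][x] < rank[u][pair[u]]:
--                 res += 1
--                 break
--     return res
-- ===== Notes on version B (the rewrite author's own statement) =====
-- stated objective: alternative
-- what changed: Instead of building an n x n rank table used on both sides and scanning all n candidates per friend, B builds one rank dictionary per friend and, for each x, walks x's own preference list in order, breaking at the partner y (or as soon as an unhappy witness is found), so only the prefix of friends x prefers to y is ever examined.
-- outside the precondition, e.g. on unhappyFriends(2, [[1], [1]], [[0, 1]]): A returns 0, B raises KeyError; on unhappyFriends(2, [[], [1, 0]], []): A returns 0, B returns 1
import Mathlib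
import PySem

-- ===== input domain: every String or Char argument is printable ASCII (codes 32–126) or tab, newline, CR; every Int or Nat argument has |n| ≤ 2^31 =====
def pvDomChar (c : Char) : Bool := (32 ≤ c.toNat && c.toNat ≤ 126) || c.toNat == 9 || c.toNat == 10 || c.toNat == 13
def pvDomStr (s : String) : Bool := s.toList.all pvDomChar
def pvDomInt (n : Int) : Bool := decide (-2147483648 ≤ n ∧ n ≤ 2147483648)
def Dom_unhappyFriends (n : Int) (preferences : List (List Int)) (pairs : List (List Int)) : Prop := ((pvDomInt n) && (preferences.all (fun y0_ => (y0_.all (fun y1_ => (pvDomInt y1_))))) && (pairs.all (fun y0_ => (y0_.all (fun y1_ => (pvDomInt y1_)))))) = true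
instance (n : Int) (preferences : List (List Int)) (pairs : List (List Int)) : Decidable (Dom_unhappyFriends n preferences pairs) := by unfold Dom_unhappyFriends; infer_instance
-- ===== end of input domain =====

-- B replaces A's n×n both-sides rank table and full 0..n inner scan by per-friend rank
-- dictionaries and an ordered walk of x's own preference list with early break at the partner (alternative decomposition).


-- ===== PORT A =====
-- the 'while u < n and not found' loop of A, transliterated
def pvWhileA (n : Int) (pair : List Int) (prefer : List (List Int)) (x y : Int) (u : Int) (found : Bool) : Bool :=
  if h : u < n ∧ found = false then
    let found' : Bool :=
      if u ≠ x ∧ u ≠ y then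
        let v := PySem.List.pyGetD pair u 0
        (found ||
          (decide (PySem.List.pyGetD (PySem.List.pyGetD prefer x []) u 0 <
                   PySem.List.pyGetD (PySem.List.pyGetD prefer x []) y 0) &&
           decide (PySem.List.pyGetD (PySem.List.pyGetD prefer u []) x 0 <
                   PySem.List.pyGetD (PySem.List.pyGetD prefer u []) v 0)))
      else found
    pvWhileA n pair prefer x y (u + 1) found'
  else found
termination_by (n - u).toNat
decreasing_by omega

def unhappyFriends (n : Int) (preferences : List (List Int)) (pairs : List (List Int)) : Int :=
  let pair := pairs.foldl
    (fun pr row =>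
      PySem.List.pySetD
        (PySem.List.pySetD pr (PySem.List.pyGetD row 0 0) (PySem.List.pyGetD row 1 0))
        (PySem.List.pyGetD row 1 0) (PySem.List.pyGetD row 0 0))
    ((PySem.List.pyRange 0 n).map (fun _ => (0 : Int)))
  let prefer := (PySem.List.pyRange 0 n).foldl
    (fun pf x =>
      (PySem.List.pyRange 0 ((PySem.List.pyGetD preferences x []).length : Int)).foldl
        (fun pf2 i =>
          PySem.List.pySetD pf2 x
            (PySem.List.pySetD (PySem.List.pyGetD pf2 x [])
              (PySem.List.pyGetD (PySem.List.pyGetD preferences x []) i 0) i))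
        pf)
    ((PySem.List.pyRange 0 n).map (fun _ => (PySem.List.pyRange 0 n).map (fun _ => (0 : Int))))
  (PySem.List.pyRange 0 n).foldl
    (fun res x =>
      let y := PySem.List.pyGetD pair x 0
      if pvWhileA n pair prefer x y 0 false then res + 1 else res)
    0

-- ===== PORT B =====
-- rank dict of one preference list: {f: i for i, f in enumerate(p)}
def pvRankOf (p : List Int) : PySem.Dict Int Int :=
  (PySem.List.enumerate p).foldl (fun d pr => d.insert pr.2 pr.1) PySem.Dict.empty

-- 'for u in preferences[x]: if u == y: break; if rank[u][x] < rank[u][pair[u]]: res += 1; break'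
-- (returns the 0/1 contribution of friend x)
def pvWalkB (rank : List (PySem.Dict Int Int)) (pair : List Int) (x y : Int) : List Int → Int
  | [] => 0
  | u :: rest =>
    if u = y then 0
    else if PySem.Dict.getD (PySem.List.pyGetD rank u PySem.Dict.empty) x 0 <
            PySem.Dict.getD (PySem.List.pyGetD rank u PySem.Dict.empty) (PySem.List.pyGetD pair u 0) 0
    then 1
    else pvWalkB rank pair x y rest

def unhappyFriends_alt (n : Int) (preferences : List (List Int)) (pairs : List (List Int)) : Int :=
  let pair := pairs.foldl
    (fun pr row =>
      PySem.List.pySetD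
        (PySem.List.pySetD pr (PySem.List.pyGetD row 0 0) (PySem.List.pyGetD row 1 0))
        (PySem.List.pyGetD row 1 0) (PySem.List.pyGetD row 0 0))
    (List.replicate n.toNat (0 : Int))
  let rank := preferences.map pvRankOf
  (PySem.List.pyRange 0 n).foldl
    (fun res x =>
      res + pvWalkB rank pair x (PySem.List.pyGetD pair x 0) (PySem.List.pyGetD preferences x []))
    0

-- ===== PRECONDITION & SPEC =====
-- Pre_ restricts to the problem's stated domain (mildly relaxed) — each of the first n preference lists a
-- permutation of the other n-1 friends, and pairs a matching (disjoint in-range 2-element rows) that pairs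
-- friend 0 whenever n ≥ 2 — because outside it A still returns accidental values read from its 0-filled
-- rank table (and B's natural dict lookups may raise KeyError there).
def Pre_unhappyFriends (n : Int) (preferences : List (List Int)) (pairs : List (List Int)) : Prop :=
  n ≤ (preferences.length : Int) ∧
  (∀ pr ∈ preferences.zipIdx, (pr.2 : Int) < n →
      pr.1.Nodup ∧ ((pr.1.length : Int) = n - 1) ∧ ∀ v ∈ pr.1, 0 ≤ v ∧ v < n ∧ v ≠ (pr.2 : Int)) ∧
  (∀ r ∈ pairs, r.length = 2) ∧
  pairs.flatten.Nodup ∧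
  (∀ v ∈ pairs.flatten, 0 ≤ v ∧ v < n) ∧
  ((0 : Int) ∈ pairs.flatten ∨ n ≤ 1)
instance (n : Int) (preferences : List (List Int)) (pairs : List (List Int)) : Decidable (Pre_unhappyFriends n preferences pairs) := by unfold Pre_unhappyFriends; infer_instance

def pvWitness_unhappyFriends : Int × List (List Int) × List (List Int) :=
  (4, [[1, 2, 3], [3, 2, 0], [3, 1, 0], [1, 2, 0]], [[0, 1], [2, 3]])

def Spec_unhappyFriends (n : Int) (preferences : List (List Int)) (pairs : List (List Int)) (out : Int) : Prop := out = unhappyFriends_alt n preferences pairs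
instance (n : Int) (preferences : List (List Int)) (pairs : List (List Int)) (out : Int) : Decidable (Spec_unhappyFriends n preferences pairs out) := by unfold Spec_unhappyFriends; infer_instance

-- ===== CLAIM (what is proved, stated in full; the proofs are below) =====
def Claim_equal_unhappyFriends : Prop := ∀ (n : Int) (preferences : List (List Int)) (pairs : List (List Int)), Dom_unhappyFriends n preferences pairs → Pre_unhappyFriends n preferences pairs → Spec_unhappyFriends n preferences pairs (unhappyFriends n preferences pairs)

-- ===== LEMMAS AND PROOFS =====

-- indexed get after indexed set, Int indices
theorem pvGetSet {α : Type} (L : List α) (i j : Int) (v d : α)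
    (hi0 : 0 ≤ i) (hj0 : 0 ≤ j) (hj : j < (L.length : Int)) :
    PySem.List.pyGetD (PySem.List.pySetD L i v) j d = if j = i then v else PySem.List.pyGetD L j d := by
  rw [PySem.List.pySetD_of_nonneg L v hi0]
  rw [PySem.List.pyGetD_eq_getElem _ d hj0 (by simp; omega)]
  rw [List.getElem_set]
  split_ifs with h1 h2 h3
  · rfl
  · omega
  · omega
  · rw [PySem.List.pyGetD_eq_getElem _ d hj0 hj]

theorem pvSetSet {α : Type} (L : List α) (i : Int) (v w : α) (hi0 : 0 ≤ i) :
    PySem.List.pySetD (PySem.List.pySetD L i v) i w = PySem.List.pySetD L i w := by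
  rw [PySem.List.pySetD_of_nonneg L v hi0, PySem.List.pySetD_of_nonneg _ w hi0,
      PySem.List.pySetD_of_nonneg L w hi0, List.set_set]

theorem pvRangeNil (u n : Int) (h : n ≤ u) : PySem.List.pyRange u n = [] :=
  List.eq_nil_iff_forall_not_mem.mpr (fun x hx => by
    have := (PySem.List.mem_pyRange_one).1 hx; omega)

theorem pvRangeNodup (n : Int) : (PySem.List.pyRange 0 n).Nodup := by
  rw [PySem.List.pyRange_of_pos 0 n (by omega)]
  exact (List.nodup_range).map (fun a b h => by omega)

theorem pvLenRange (n : Int) : ((PySem.List.pyRange 0 n).length : Int) = max n 0 := by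
  rw [PySem.List.pyRange_of_pos 0 n (by omega)]
  simp

theorem pvZerosEq (n : Int) :
    (PySem.List.pyRange 0 n).map (fun _ => (0 : Int)) = List.replicate n.toNat 0 := by
  apply List.eq_replicate_iff.mpr
  constructor
  · have := pvLenRange n; simp at this ⊢
  · intro b hb; simp at hb; omega

theorem pvPairFold (rows : List (List Int)) (init : List Int)
    (hlen2 : ∀ r ∈ rows, r.length = 2)
    (hrange : ∀ v ∈ rows.flatten, 0 ≤ v ∧ v < (init.length : Int))
    (hnd : rows.flatten.Nodup) :
    (rows.foldl
      (fun pr row =>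
        PySem.List.pySetD
          (PySem.List.pySetD pr (PySem.List.pyGetD row 0 0) (PySem.List.pyGetD row 1 0))
          (PySem.List.pyGetD row 1 0) (PySem.List.pyGetD row 0 0)) init).length = init.length ∧
    ∀ k : Int, 0 ≤ k → k < (init.length : Int) →
      ((k ∉ rows.flatten →
        PySem.List.pyGetD (rows.foldl
          (fun pr row =>
            PySem.List.pySetD
              (PySem.List.pySetD pr (PySem.List.pyGetD row 0 0) (PySem.List.pyGetD row 1 0))
              (PySem.List.pyGetD row 1 0) (PySem.List.pyGetD row 0 0)) init) k 0 = PySem.List.pyGetD init k 0) ∧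
      (k ∈ rows.flatten →
        0 ≤ PySem.List.pyGetD (rows.foldl
          (fun pr row =>
            PySem.List.pySetD
              (PySem.List.pySetD pr (PySem.List.pyGetD row 0 0) (PySem.List.pyGetD row 1 0))
              (PySem.List.pyGetD row 1 0) (PySem.List.pyGetD row 0 0)) init) k 0 ∧
        PySem.List.pyGetD (rows.foldl
          (fun pr row =>
            PySem.List.pySetD
              (PySem.List.pySetD pr (PySem.List.pyGetD row 0 0) (PySem.List.pyGetD row 1 0))
              (PySem.List.pyGetD row 1 0) (PySem.List.pyGetD row 0 0)) init) k 0 < (init.length : Int) ∧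
        PySem.List.pyGetD (rows.foldl
          (fun pr row =>
            PySem.List.pySetD
              (PySem.List.pySetD pr (PySem.List.pyGetD row 0 0) (PySem.List.pyGetD row 1 0))
              (PySem.List.pyGetD row 1 0) (PySem.List.pyGetD row 0 0)) init) k 0 ≠ k)) := by
  induction rows generalizing init with
  | nil => exact ⟨rfl, by intro k _ _; exact ⟨fun _ => rfl, by simp⟩⟩
  | cons row rest ih =>
    obtain ⟨a, b, rfl⟩ : ∃ a b, row = [a, b] := by
      have h2 := hlen2 row (by simp)
      match row, h2 with
      | [a, b], _ => exact ⟨a, b, rfl⟩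
    have hfa : a ∈ (([a, b] :: rest).flatten) := by simp
    have hfb : b ∈ (([a, b] :: rest).flatten) := by simp
    have ha := hrange a hfa
    have hb := hrange b hfb
    have hflat : (([a, b] :: rest).flatten) = a :: b :: rest.flatten := by simp
    rw [hflat] at hnd
    have hnd1 := List.nodup_cons.mp hnd
    have hnd2 := List.nodup_cons.mp hnd1.2
    have hmem1 : ¬(a = b ∨ a ∈ rest.flatten) := by
      have := hnd1.1; rw [List.mem_cons] at this; exact this
    have hab : a ≠ b := fun h => hmem1 (Or.inl h)
    have hanr : a ∉ rest.flatten := fun h => hmem1 (Or.inr h)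
    have hbnr : b ∉ rest.flatten := hnd2.1
    simp only [List.foldl_cons]
    have hget0 : PySem.List.pyGetD [a, b] 0 0 = a := rfl
    have hget1 : PySem.List.pyGetD [a, b] 1 0 = b := rfl
    rw [hget0, hget1]
    set init' := PySem.List.pySetD (PySem.List.pySetD init a b) b a with hinit'
    have hlen' : init'.length = init.length := by
      rw [hinit', PySem.List.length_pySetD, PySem.List.length_pySetD]
    have hget' : ∀ j : Int, 0 ≤ j → j < (init.length : Int) →
        PySem.List.pyGetD init' j 0 =
          if j = b then a else if j = a then b else PySem.List.pyGetD init j 0 := by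
      intro j hj0 hj
      rw [hinit', pvGetSet _ b j a 0 hb.1 hj0 (by rw [PySem.List.length_pySetD]; exact hj)]
      rw [pvGetSet init a j b 0 ha.1 hj0 hj]
    have hrest := ih init'
      (fun r hr => hlen2 r (by simp [hr]))
      (fun v hv => by
        have := hrange v (by rw [hflat, List.mem_cons, List.mem_cons]; exact Or.inr (Or.inr hv))
        omega)
      hnd2.2
    refine ⟨by rw [hrest.1, hlen'], ?_⟩
    intro k hk0 hk
    have hres := hrest.2 k hk0 (by omega)
    constructor
    · intro hknot
      rw [hflat, List.mem_cons, List.mem_cons] at hknot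
      rw [not_or, not_or] at hknot
      rw [(hres.1 hknot.2.2)]
      rw [hget' k hk0 hk]
      rw [if_neg hknot.2.1, if_neg hknot.1]
    · intro hkin
      rw [hflat, List.mem_cons, List.mem_cons] at hkin
      rcases hkin with hka | hkb | hkr
      · rw [hres.1 (by rw [hka]; exact hanr), hget' k hk0 hk]
        rw [if_neg (by rw [hka]; exact hab), if_pos hka]
        exact ⟨hb.1, hb.2, by rw [hka]; exact fun h => hab h.symm⟩
      · rw [hres.1 (by rw [hkb]; exact hbnr), hget' k hk0 hk]
        rw [if_pos hkb]
        exact ⟨ha.1, ha.2, by rw [hkb]; exact hab⟩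
      · have h3 := hres.2 hkr
        omega


-- applying one rank-assignment pass to a single row
def pvApplyRanks (p R : List Int) (s : Int) : List Int :=
  (PySem.List.enumerate p s).foldl (fun r pr => PySem.List.pySetD r pr.2 pr.1) R

theorem pvApplyRanks_cons (v : Int) (p R : List Int) (s : Int) :
    pvApplyRanks (v :: p) R s = pvApplyRanks p (PySem.List.pySetD R v s) (s + 1) := by
  unfold pvApplyRanks
  rw [PySem.List.enumerate_cons]
  rfl

theorem pvApplyRanks_get (p : List Int) : ∀ (R : List Int) (s : Int), p.Nodup →
    (∀ v ∈ p, 0 ≤ v ∧ v < (R.length : Int)) →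
    ∀ w : Int, 0 ≤ w → w < (R.length : Int) →
      PySem.List.pyGetD (pvApplyRanks p R s) w 0 =
        if w ∈ p then s + (p.idxOf w : Int) else PySem.List.pyGetD R w 0 := by
  induction p with
  | nil => intro R s _ _ w hw0 hw; simp [pvApplyRanks, PySem.List.enumerate_nil]
  | cons v rest ih =>
    intro R s hnd hr w hw0 hw
    rw [pvApplyRanks_cons]
    have hv := hr v (by simp)
    have hlen : ((PySem.List.pySetD R v s).length : Int) = (R.length : Int) := by
      rw [PySem.List.length_pySetD]
    have hnd' := (List.nodup_cons.mp hnd)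
    rw [ih (PySem.List.pySetD R v s) (s + 1) hnd'.2
        (fun u hu => by have := hr u (List.mem_cons_of_mem _ hu); omega) w hw0 (by omega)]
    by_cases hwr : w ∈ rest
    · have hwv : w ≠ v := fun h => hnd'.1 (h ▸ hwr)
      simp [hwr, hwv, List.idxOf_cons_ne _ (fun h => hwv h.symm)]
      ring
    · by_cases hwv : w = v
      · subst hwv
        simp [hwr, List.idxOf_cons_self]
        rw [pvGetSet R w w s 0 hv.1 hw0 hw]
        simp
      · have : w ∉ v :: rest := by simp [hwv, hwr]
        simp [this, hwr]
        rw [pvGetSet R v w s 0 hv.1 hw0 hw]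
        simp [hwv]

theorem pvInnerBridge (p R : List Int) :
    (PySem.List.pyRange 0 (p.length : Int)).foldl
      (fun r i => PySem.List.pySetD r (PySem.List.pyGetD p i 0) i) R = pvApplyRanks p R 0 := by
  unfold pvApplyRanks
  rw [PySem.List.enumerate_eq_map_pyRange p 0, List.foldl_map]
  simp [PySem.List.len]


theorem pvRowUpdate (f : Int → Int) (x : Int) :
    ∀ (is : List Int) (pf : List (List Int)), 0 ≤ x → x < (pf.length : Int) →
    is.foldl (fun pf2 i => PySem.List.pySetD pf2 x (PySem.List.pySetD (PySem.List.pyGetD pf2 x []) (f i) i)) pf =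
      PySem.List.pySetD pf x (is.foldl (fun r i => PySem.List.pySetD r (f i) i) (PySem.List.pyGetD pf x [])) := by
  intro is
  induction is with
  | nil =>
    intro pf hx0 hx
    simp
    rw [PySem.List.pySetD_of_nonneg _ _ hx0, PySem.List.pyGetD_eq_getElem _ [] hx0 hx, List.set_getElem_self]
  | cons i rest ih =>
    intro pf hx0 hx
    simp only [List.foldl_cons]
    rw [ih _ hx0 (by rw [PySem.List.length_pySetD]; omega)]
    rw [pvGetSet pf x x _ [] hx0 hx0 hx]
    simp
    rw [pvSetSet _ x _ _ hx0]

theorem pvTableFold (preferences : List (List Int)) :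
    ∀ (xs : List Int) (T : List (List Int)), xs.Nodup → (∀ x ∈ xs, 0 ≤ x ∧ x < (T.length : Int)) →
    (xs.foldl
      (fun pf x =>
        (PySem.List.pyRange 0 ((PySem.List.pyGetD preferences x []).length : Int)).foldl
          (fun pf2 i =>
            PySem.List.pySetD pf2 x
              (PySem.List.pySetD (PySem.List.pyGetD pf2 x [])
                (PySem.List.pyGetD (PySem.List.pyGetD preferences x []) i 0) i))
          pf) T).length = T.length ∧
    ∀ x : Int, 0 ≤ x → x < (T.length : Int) →
      PySem.List.pyGetD (xs.foldl
        (fun pf x =>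
          (PySem.List.pyRange 0 ((PySem.List.pyGetD preferences x []).length : Int)).foldl
            (fun pf2 i =>
              PySem.List.pySetD pf2 x
                (PySem.List.pySetD (PySem.List.pyGetD pf2 x [])
                  (PySem.List.pyGetD (PySem.List.pyGetD preferences x []) i 0) i))
            pf) T) x [] =
        if x ∈ xs then pvApplyRanks (PySem.List.pyGetD preferences x []) (PySem.List.pyGetD T x []) 0
        else PySem.List.pyGetD T x [] := by
  intro xs
  induction xs with
  | nil => intro T _ _; exact ⟨rfl, by intro x _ _; simp⟩
  | cons a rest ih =>
    intro T hnd hb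
    have ha := hb a (by simp)
    have hnd' := List.nodup_cons.mp hnd
    simp only [List.foldl_cons]
    rw [pvRowUpdate _ a _ T ha.1 ha.2, pvInnerBridge]
    set T' := PySem.List.pySetD T a (pvApplyRanks (PySem.List.pyGetD preferences a []) (PySem.List.pyGetD T a []) 0) with hT'
    have hlenT' : T'.length = T.length := by rw [hT', PySem.List.length_pySetD]
    have hres := ih T' hnd'.2 (fun u hu => by have := hb u (List.mem_cons_of_mem _ hu); omega)
    refine ⟨by rw [hres.1, hlenT'], ?_⟩
    intro x hx0 hx
    rw [hres.2 x hx0 (by omega)]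
    by_cases hxr : x ∈ rest
    · have hxa : x ≠ a := fun h => hnd'.1 (h ▸ hxr)
      have : PySem.List.pyGetD T' x [] = PySem.List.pyGetD T x [] := by
        rw [hT', pvGetSet T a x _ [] ha.1 hx0 hx]
        simp [hxa]
      rw [this]
      simp [hxr]
    · by_cases hxa : x = a
      · subst hxa
        have : PySem.List.pyGetD T' x [] = pvApplyRanks (PySem.List.pyGetD preferences x []) (PySem.List.pyGetD T x []) 0 := by
          rw [hT', pvGetSet T x x _ [] ha.1 hx0 hx]
          simp
        rw [this]
        simp [hxr]
      · have : PySem.List.pyGetD T' x [] = PySem.List.pyGetD T x [] := by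
          rw [hT', pvGetSet T a x _ [] ha.1 hx0 hx]
          simp [hxa]
        rw [this]
        simp [hxr, hxa]

theorem pvRankChar (p : List Int) : ∀ (d : PySem.Dict Int Int) (s : Int), p.Nodup →
    ∀ w : Int, PySem.Dict.getD ((PySem.List.enumerate p s).foldl (fun d pr => d.insert pr.2 pr.1) d) w 0 =
      if w ∈ p then s + (p.idxOf w : Int) else PySem.Dict.getD d w 0 := by
  induction p with
  | nil => intro d s _ w; simp [PySem.List.enumerate_nil]
  | cons v rest ih =>
    intro d s hnd w
    rw [PySem.List.enumerate_cons]
    have hnd' := List.nodup_cons.mp hnd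
    show PySem.Dict.getD ((PySem.List.enumerate rest (s+1)).foldl (fun d pr => d.insert pr.2 pr.1) (d.insert v s)) w 0 = _
    rw [ih (d.insert v s) (s + 1) hnd'.2 w]
    by_cases hwr : w ∈ rest
    · have hwv : w ≠ v := fun h => hnd'.1 (h ▸ hwr)
      simp [hwr, hwv, List.idxOf_cons_ne _ (fun h => hwv h.symm)]
      ring
    · by_cases hwv : w = v
      · subst hwv
        simp [hwr, List.idxOf_cons_self]
      · have : w ∉ v :: rest := by simp [hwv, hwr]
        simp [this, hwr, PySem.Dict.getD_insert, hwv]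

def pvCondA (pair : List Int) (prefer : List (List Int)) (x y u : Int) : Bool :=
  if u ≠ x ∧ u ≠ y then
    (decide (PySem.List.pyGetD (PySem.List.pyGetD prefer x []) u 0 <
             PySem.List.pyGetD (PySem.List.pyGetD prefer x []) y 0) &&
     decide (PySem.List.pyGetD (PySem.List.pyGetD prefer u []) x 0 <
             PySem.List.pyGetD (PySem.List.pyGetD prefer u []) (PySem.List.pyGetD pair u 0) 0))
  else false

theorem pvWhileA_true (n : Int) (pair : List Int) (prefer : List (List Int)) (x y : Int) (u : Int) :
    pvWhileA n pair prefer x y u true = true := by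
  rw [pvWhileA]; simp

theorem pvWhileA_step (n : Int) (pair : List Int) (prefer : List (List Int)) (x y u : Int) (hu : u < n) :
    pvWhileA n pair prefer x y u false =
      pvWhileA n pair prefer x y (u + 1) (pvCondA pair prefer x y u) := by
  conv_lhs => rw [pvWhileA]
  rw [dif_pos (And.intro hu rfl)]
  simp only [Bool.false_or, pvCondA]

theorem pvWhileA_char (n : Int) (pair : List Int) (prefer : List (List Int)) (x y : Int) :
    ∀ u : Int, pvWhileA n pair prefer x y u false =
      (PySem.List.pyRange u n).any (fun u' => pvCondA pair prefer x y u') := by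
  suffices h : ∀ k : Nat, ∀ u : Int, (n - u).toNat ≤ k → pvWhileA n pair prefer x y u false =
      (PySem.List.pyRange u n).any (fun u' => pvCondA pair prefer x y u') by
    intro u; exact h (n - u).toNat u le_rfl
  intro k
  induction k with
  | zero =>
    intro u hk
    rw [pvWhileA, pvRangeNil u n (by omega)]
    simp only [List.any_nil]
    rw [dif_neg (by omega)]
  | succ k ih =>
    intro u hk
    by_cases hu : u < n
    · rw [pvWhileA_step n pair prefer x y u hu, PySem.List.pyRange_one_cons hu, List.any_cons]
      cases hc : pvCondA pair prefer x y u with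
      | true => rw [pvWhileA_true]; simp
      | false => rw [ih (u + 1) (by omega)]; simp
    · rw [pvWhileA, pvRangeNil u n (by omega)]
      simp only [List.any_nil]
      rw [dif_neg (by omega)]

theorem pvWalk_char (rank : List (PySem.Dict Int Int)) (pair : List Int) (x y : Int) :
    ∀ lst : List Int, pvWalkB rank pair x y lst =
      (if (lst.takeWhile (fun u => decide (u ≠ y))).any
           (fun u => decide (PySem.Dict.getD (PySem.List.pyGetD rank u PySem.Dict.empty) x 0 <
                             PySem.Dict.getD (PySem.List.pyGetD rank u PySem.Dict.empty) (PySem.List.pyGetD pair u 0) 0))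
       then (1 : Int) else 0) := by
  intro lst
  induction lst with
  | nil => simp [pvWalkB]
  | cons u rest ih =>
    by_cases huy : u = y
    · simp [pvWalkB, huy]
    · rw [pvWalkB]
      rw [if_neg huy]
      rw [List.takeWhile_cons]
      simp only [huy, decide_not]
      by_cases hc : PySem.Dict.getD (PySem.List.pyGetD rank u PySem.Dict.empty) x 0 <
            PySem.Dict.getD (PySem.List.pyGetD rank u PySem.Dict.empty) (PySem.List.pyGetD pair u 0) 0
      · simp [hc]
      · simp only [if_neg hc, ih]
        simp [hc]

theorem pvTakeWhileMem (l : List Int) (y : Int) (hnd : l.Nodup) (hy : y ∈ l) :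
    ∀ v : Int, v ∈ l.takeWhile (fun u => decide (u ≠ y)) ↔ v ∈ l ∧ l.idxOf v < l.idxOf y := by
  induction l with
  | nil => simp
  | cons a rest ih =>
    intro v
    have hnd' := List.nodup_cons.mp hnd
    by_cases hay : a = y
    · subst hay
      rw [List.takeWhile_cons]
      simp only [decide_not, decide_true, Bool.not_true, Bool.false_eq_true, if_false,
        List.not_mem_nil, false_iff, List.idxOf_cons_self, not_and, not_lt]
      intro _
      omega
    · have hyr : y ∈ rest := by
        cases List.mem_cons.mp hy with
        | inl h => exact absurd h.symm hay
        | inr h => exact h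
      rw [List.takeWhile_cons]
      simp only [hay, decide_false, decide_not, Bool.not_false, if_true]
      simp only [decide_not] at ih
      constructor
      · intro hv
        rcases List.mem_cons.mp hv with h | h
        · subst h
          refine ⟨List.mem_cons.mpr (Or.inl rfl), ?_⟩
          rw [List.idxOf_cons_self, List.idxOf_cons_ne _ hay]
          omega
        · have hm := (ih hnd'.2 hyr v).mp h
          have hva : v ≠ a := fun he => hnd'.1 (he ▸ hm.1)
          refine ⟨List.mem_cons.mpr (Or.inr hm.1), ?_⟩
          rw [List.idxOf_cons_ne _ (fun h => hva h.symm), List.idxOf_cons_ne _ hay]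
          omega
      · rintro ⟨hv, hlt⟩
        by_cases hva : v = a
        · exact List.mem_cons.mpr (Or.inl hva)
        · apply List.mem_cons.mpr
          apply Or.inr
          apply (ih hnd'.2 hyr v).mpr
          rcases List.mem_cons.mp hv with h | h
          · exact absurd h hva
          · refine ⟨h, ?_⟩
            rw [List.idxOf_cons_ne _ (fun hh => hva hh.symm), List.idxOf_cons_ne _ hay] at hlt
            omega

theorem pvCovers (S : Finset Int) (l : List Int) (hnd : l.Nodup)
    (hsub : ∀ v ∈ l, v ∈ S) (hcard : S.card ≤ l.length) : ∀ w ∈ S, w ∈ l := by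
  intro w hw
  have h1 : l.toFinset.card = l.length := List.toFinset_card_of_nodup hnd
  have h2 : l.toFinset ⊆ S := fun v hv => hsub v (List.mem_toFinset.mp hv)
  have h3 : S = l.toFinset := (Finset.eq_of_subset_of_card_le h2 (by omega)).symm
  exact List.mem_toFinset.mp (h3 ▸ hw)

theorem pvRowFacts (n : Int) (preferences : List (List Int))
    (hn0 : 0 ≤ n) (hnlen : n ≤ (preferences.length : Int))
    (hrows : ∀ pr ∈ preferences.zipIdx, (pr.2 : Int) < n →
      pr.1.Nodup ∧ ((pr.1.length : Int) = n - 1) ∧ ∀ v ∈ pr.1, 0 ≤ v ∧ v < n ∧ v ≠ (pr.2 : Int))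
    (x : Int) (hx0 : 0 ≤ x) (hx : x < n) :
    (PySem.List.pyGetD preferences x []).Nodup ∧
    (((PySem.List.pyGetD preferences x []).length : Int) = n - 1) ∧
    (∀ v ∈ PySem.List.pyGetD preferences x [], 0 ≤ v ∧ v < n ∧ v ≠ x) ∧
    (∀ w : Int, 0 ≤ w → w < n → w ≠ x → w ∈ PySem.List.pyGetD preferences x []) := by
  have hxl : x.toNat < preferences.length := by omega
  have hpx : PySem.List.pyGetD preferences x [] = preferences[x.toNat] :=
    PySem.List.pyGetD_eq_getElem _ _ hx0 (by omega)
  have hmem : (preferences[x.toNat], x.toNat) ∈ preferences.zipIdx := by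
    have hl : x.toNat < (preferences.zipIdx).length := by rw [List.length_zipIdx]; exact hxl
    have := List.getElem_mem hl
    rwa [List.getElem_zipIdx hl, Nat.zero_add] at this
  have hrx := hrows _ hmem (by simp; omega)
  have hcast : ((x.toNat : Int)) = x := by omega
  rw [hcast] at hrx
  obtain ⟨hnd, hlen, hvals⟩ := hrx
  rw [hpx]
  refine ⟨hnd, hlen, hvals, ?_⟩
  have hxIcc : x ∈ Finset.Icc 0 (n - 1) := by simp [Finset.mem_Icc]; omega
  have hcov := pvCovers ((Finset.Icc 0 (n - 1)).erase x) preferences[x.toNat] hnd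
    (fun v hv => by
      have := hvals v hv
      simp [Finset.mem_erase, Finset.mem_Icc]
      refine ⟨this.2.2, this.1, by omega⟩)
    (by
      rw [Finset.card_erase_of_mem hxIcc, Int.card_Icc]
      have h9 : ((preferences[x.toNat].length : Int)) = n - 1 := hlen
      omega)
  intro w hw0 hw hwx
  exact hcov w (by simp [Finset.mem_erase, Finset.mem_Icc]; exact ⟨hwx, hw0, by omega⟩)

-- ===== VERDICT (by name: the statement is the Claim_ definition above) =====
theorem unhappyFriends_spec : Claim_equal_unhappyFriends := by
  intro n preferences pairs _ hpre
  obtain ⟨hnlen, hrows, hlen2, hndf, hfrange, hzero⟩ := hpre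
  unfold Spec_unhappyFriends
  by_cases hn0 : 0 ≤ n
  case neg =>
    -- n < 0: both ports fold over the empty range and return 0
    simp only [unhappyFriends, unhappyFriends_alt]
    rw [pvRangeNil 0 n (by omega)]
    simp
  simp only [unhappyFriends, unhappyFriends_alt]
  rw [pvZerosEq n]
  set P := pairs.foldl
    (fun pr row =>
      PySem.List.pySetD
        (PySem.List.pySetD pr (PySem.List.pyGetD row 0 0) (PySem.List.pyGetD row 1 0))
        (PySem.List.pyGetD row 1 0) (PySem.List.pyGetD row 0 0))
    (List.replicate n.toNat (0 : Int)) with hP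
  set T := (PySem.List.pyRange 0 n).foldl
    (fun pf x =>
      (PySem.List.pyRange 0 ((PySem.List.pyGetD preferences x []).length : Int)).foldl
        (fun pf2 i =>
          PySem.List.pySetD pf2 x
            (PySem.List.pySetD (PySem.List.pyGetD pf2 x [])
              (PySem.List.pyGetD (PySem.List.pyGetD preferences x []) i 0) i))
        pf)
    ((PySem.List.pyRange 0 n).map (fun _ => List.replicate n.toNat (0 : Int))) with hT
  set R := preferences.map pvRankOf with hR
  -- partner-array facts
  have hrepl : ((List.replicate n.toNat (0 : Int)).length : Int) = n := by simp; omega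
  have hpairF := pvPairFold pairs (List.replicate n.toNat 0) hlen2
    (fun v hv => by have := hfrange v hv; omega) hndf
  have hPg : ∀ k : Int, 0 ≤ k → k < n → n ≠ 1 →
      0 ≤ PySem.List.pyGetD P k 0 ∧ PySem.List.pyGetD P k 0 < n ∧ PySem.List.pyGetD P k 0 ≠ k := by
    intro k hk0 hk hn1
    by_cases hkf : k ∈ pairs.flatten
    · have := (hpairF.2 k hk0 (by omega)).2 hkf
      rw [← hP] at this
      refine ⟨this.1, by omega, this.2.2⟩
    · have hinit : PySem.List.pyGetD (List.replicate n.toNat (0 : Int)) k 0 = 0 := by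
        rw [PySem.List.pyGetD_eq_getElem _ 0 hk0 (by simp; omega)]
        exact List.getElem_replicate _
      have := (hpairF.2 k hk0 (by omega)).1 hkf
      rw [← hP] at this
      rw [this, hinit]
      have hk0' : k ≠ 0 := by
        rcases hzero with h0 | h0
        · exact fun h => hkf (h ▸ h0)
        · omega
      exact ⟨le_rfl, by omega, fun h => hk0' h.symm⟩
  -- prefer-table facts
  have hT0len : (((PySem.List.pyRange 0 n).map (fun _ => List.replicate n.toNat (0 : Int))).length : Int) = n := by
    simp only [List.length_map]; rw [pvLenRange]; omega
  have hTF := pvTableFold preferences (PySem.List.pyRange 0 n)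
    ((PySem.List.pyRange 0 n).map (fun _ => List.replicate n.toNat (0 : Int)))
    (pvRangeNodup n)
    (fun u hu => by have := PySem.List.mem_pyRange_one.1 hu; omega)
  have hTrow : ∀ x : Int, 0 ≤ x → x < n →
      ∀ w ∈ PySem.List.pyGetD preferences x [],
        PySem.List.pyGetD (PySem.List.pyGetD T x []) w 0 =
          ((PySem.List.pyGetD preferences x []).idxOf w : Int) := by
    intro x hx0 hx w hw
    have hrf := pvRowFacts n preferences hn0 hnlen hrows x hx0 hx
    have hx2 := hTF.2 x hx0 (by omega)
    rw [← hT] at hx2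
    rw [hx2, if_pos (PySem.List.mem_pyRange_one.2 ⟨hx0, hx⟩)]
    rw [PySem.List.pyGetD_map_pyRange_of_nonneg _ n _ [] hx0 hx]
    rw [pvApplyRanks_get _ _ 0 hrf.1
      (fun v hv => by have := hrf.2.2.1 v hv; omega) w
      (by have := hrf.2.2.1 w hw; omega) (by have := hrf.2.2.1 w hw; omega)]
    rw [if_pos hw]
    omega
  -- rank-dictionary facts
  have hRrow : ∀ u : Int, 0 ≤ u → u < n →
      ∀ w ∈ PySem.List.pyGetD preferences u [],
        PySem.Dict.getD (PySem.List.pyGetD R u PySem.Dict.empty) w 0 =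
          ((PySem.List.pyGetD preferences u []).idxOf w : Int) := by
    intro u hu0 hu w hw
    have hrf := pvRowFacts n preferences hn0 hnlen hrows u hu0 hu
    have hemp : (PySem.Dict.empty : PySem.Dict Int Int) = pvRankOf [] := rfl
    rw [hR, hemp, PySem.List.pyGetD_map pvRankOf preferences u []]
    show PySem.Dict.getD ((PySem.List.enumerate (PySem.List.pyGetD preferences u []) 0).foldl
      (fun d pr => d.insert pr.2 pr.1) PySem.Dict.empty) w 0 = _
    rw [pvRankChar _ PySem.Dict.empty 0 hrf.1 w, if_pos hw]
    omega
  apply PySem.List.foldl_congr_mem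
  intro acc x hx
  obtain ⟨hx0, hxn⟩ := PySem.List.mem_pyRange_one.1 hx
  have hrfx := pvRowFacts n preferences hn0 hnlen hrows x hx0 hxn
  by_cases hn1 : n = 1
  · -- a single friend: both sides contribute nothing
    have hxeq : x = 0 := by omega
    subst hxeq
    have hrange1 : PySem.List.pyRange 0 n = [0] := by
      rw [hn1, PySem.List.pyRange_one_cons (by omega)]
      norm_num
    have hpxnil : PySem.List.pyGetD preferences 0 [] = [] := by
      have := hrfx.2.1
      rw [hn1] at this
      simpa using List.eq_nil_of_length_eq_zero (by omega)
    rw [pvWhileA_char n P T 0 (PySem.List.pyGetD P 0 0) 0,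
        pvWalk_char R P 0 (PySem.List.pyGetD P 0 0) (PySem.List.pyGetD preferences 0 []),
        hrange1, hpxnil]
    have hc0 : pvCondA P T 0 (PySem.List.pyGetD P 0 0) 0 = false := by
      unfold pvCondA
      rw [if_neg (by simp)]
    simp [hc0]
  have hyg := hPg x hx0 hxn hn1
  have hymem : (PySem.List.pyGetD P x 0) ∈ (PySem.List.pyGetD preferences x []) := hrfx.2.2.2 (PySem.List.pyGetD P x 0) hyg.1 hyg.2.1 hyg.2.2
  rw [pvWhileA_char n P T x (PySem.List.pyGetD P x 0) 0, pvWalk_char R P x (PySem.List.pyGetD P x 0) (PySem.List.pyGetD preferences x [])]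
  have hs : (PySem.List.pyRange 0 n).any (fun u' => pvCondA P T x (PySem.List.pyGetD P x 0) u') =
      ( (PySem.List.pyGetD preferences x []).takeWhile (fun u => decide (u ≠ (PySem.List.pyGetD P x 0)))).any
        (fun u => decide (PySem.Dict.getD (PySem.List.pyGetD R u PySem.Dict.empty) x 0 <
                          PySem.Dict.getD (PySem.List.pyGetD R u PySem.Dict.empty) (PySem.List.pyGetD P u 0) 0)) := by
    apply Bool.eq_iff_iff.mpr
    simp only [List.any_eq_true]
    constructor
    · rintro ⟨u, hu, hcond⟩
      obtain ⟨hu0, hun⟩ := PySem.List.mem_pyRange_one.1 hu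
      unfold pvCondA at hcond
      by_cases hne : u ≠ x ∧ u ≠ (PySem.List.pyGetD P x 0)
      · rw [if_pos hne] at hcond
        simp only [Bool.and_eq_true, decide_eq_true_eq] at hcond
        have humem : u ∈ (PySem.List.pyGetD preferences x []) := hrfx.2.2.2 u hu0 hun hne.1
        have hc1 := hcond.1
        rw [hTrow x hx0 hxn u humem, hTrow x hx0 hxn (PySem.List.pyGetD P x 0) hymem] at hc1
        have hrfu := pvRowFacts n preferences hn0 hnlen hrows u hu0 hun
        have hvg := hPg u hu0 hun hn1
        have hxmem : x ∈ PySem.List.pyGetD preferences u [] :=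
          hrfu.2.2.2 x hx0 hxn (fun h => hne.1 h.symm)
        have hvmem : PySem.List.pyGetD P u 0 ∈ PySem.List.pyGetD preferences u [] :=
          hrfu.2.2.2 _ hvg.1 hvg.2.1 hvg.2.2
        have hc2 := hcond.2
        rw [hTrow u hu0 hun x hxmem, hTrow u hu0 hun _ hvmem] at hc2
        refine ⟨u, (pvTakeWhileMem (PySem.List.pyGetD preferences x []) (PySem.List.pyGetD P x 0) hrfx.1 hymem u).mpr ⟨humem, by omega⟩, ?_⟩
        rw [hRrow u hu0 hun x hxmem, hRrow u hu0 hun _ hvmem]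
        exact decide_eq_true hc2
      · rw [if_neg hne] at hcond
        exact absurd hcond (by simp)
    · rintro ⟨u, hu, hcb⟩
      obtain ⟨humem, hidx⟩ := (pvTakeWhileMem (PySem.List.pyGetD preferences x []) (PySem.List.pyGetD P x 0) hrfx.1 hymem u).mp hu
      have hug := hrfx.2.2.1 u humem
      have huy : u ≠ (PySem.List.pyGetD P x 0) := fun h => by rw [h] at hidx; omega
      have hrfu := pvRowFacts n preferences hn0 hnlen hrows u hug.1 hug.2.1
      have hvg := hPg u hug.1 hug.2.1 hn1
      have hxmem : x ∈ PySem.List.pyGetD preferences u [] :=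
        hrfu.2.2.2 x hx0 hxn (fun h => hug.2.2 h.symm)
      have hvmem : PySem.List.pyGetD P u 0 ∈ PySem.List.pyGetD preferences u [] :=
        hrfu.2.2.2 _ hvg.1 hvg.2.1 hvg.2.2
      rw [hRrow u hug.1 hug.2.1 x hxmem, hRrow u hug.1 hug.2.1 _ hvmem] at hcb
      simp only [decide_eq_true_eq] at hcb
      refine ⟨u, PySem.List.mem_pyRange_one.2 ⟨hug.1, hug.2.1⟩, ?_⟩
      unfold pvCondA
      rw [if_pos ⟨hug.2.2, huy⟩]
      rw [hTrow x hx0 hxn u humem, hTrow x hx0 hxn (PySem.List.pyGetD P x 0) hymem,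
          hTrow u hug.1 hug.2.1 x hxmem, hTrow u hug.1 hug.2.1 _ hvmem]
      simp only [Bool.and_eq_true, decide_eq_true_eq]
      exact ⟨by omega, hcb⟩
  rw [hs]
  cases ( (PySem.List.pyGetD preferences x []).takeWhile (fun u => decide (u ≠ (PySem.List.pyGetD P x 0)))).any
      (fun u => decide (PySem.Dict.getD (PySem.List.pyGetD R u PySem.Dict.empty) x 0 <
                        PySem.Dict.getD (PySem.List.pyGetD R u PySem.Dict.empty) (PySem.List.pyGetD P u 0) 0)) with
  | true => simp
  | false => simp
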